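-- pv_equiv track=rewrite | github.com/1r0nw1ll/quantum-arithmetic-research | qa_alphageometry_ptolemy/qa_signal_generator_inference_cert_v1/qa_signal_generator_inference_cert_validate.py | verify_uniqueness
-- ===== SOURCE A (Python) =====
-- def verify_uniqueness(m):
--     """Verify each (b_t, b_{t+1}) maps to exactly one e."""
--     for b_t in range(1, m + 1):
--         for b_next in range(1, m + 1):
--             matches = []
--             for e in range(1, m + 1):
--                 b_check = ((b_t + e - 1) % m) + 1
--                 if b_check == b_next:
--                     matches.append(e)
--             if len(matches) != 1:
--                 return False, f"({b_t},{b_next}) has {len(matches)} solutions: {matches}"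
--     return True, f"unique e for all {m*m} pairs"
-- ===== SOURCE B (Python) =====
-- def verify_uniqueness(m):
--     """Verify each (b_t, b_{t+1}) maps to exactly one e.
--
--     The number of solutions e of ((b_t + e - 1) % m) + 1 == b_next depends
--     only on (b_next - b_t) mod m, so it suffices to tally, once, how many
--     e in 1..m hit each target for b_t = 1 and check every count is 1 —
--     one histogram pass instead of a scan per pair.
--     """
--     counts = {}
--     for e in range(1, m + 1):
--         b = (e % m) + 1
--         counts[b] = counts.get(b, 0) + 1
--     for b_next in range(1, m + 1):
--         c = counts.get(b_next, 0)
--         if c != 1: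
--             return False, f"(1,{b_next}) has {c} solutions"
--     return True, f"unique e for all {m*m} pairs"
-- ===== Notes on version B (the rewrite author's own statement) =====
-- stated objective: faster
-- what changed: The triple nested loop (for every pair scan all e) is replaced by a single histogram pass: since the solution count depends only on (b_next - b_t) mod m, B tallies the shift map's targets once for b_t = 1 in a dict and checks each count is 1.
import Mathlib
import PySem

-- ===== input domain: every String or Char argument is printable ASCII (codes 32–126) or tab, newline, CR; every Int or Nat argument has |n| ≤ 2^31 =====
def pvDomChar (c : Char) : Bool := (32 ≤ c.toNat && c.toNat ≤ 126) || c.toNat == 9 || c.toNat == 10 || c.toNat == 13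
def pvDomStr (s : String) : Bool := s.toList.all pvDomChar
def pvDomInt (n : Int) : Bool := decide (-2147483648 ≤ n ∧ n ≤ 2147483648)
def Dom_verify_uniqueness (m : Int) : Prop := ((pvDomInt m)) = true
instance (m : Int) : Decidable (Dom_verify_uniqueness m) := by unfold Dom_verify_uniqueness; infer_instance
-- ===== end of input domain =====

-- B replaces A's per-pair scan over all e (O(m^3)) by one histogram pass over the
-- shift map's targets for b_t = 1 plus a count check (O(m)); measured faster.


-- ===== PORT A =====
-- f"{matchList}" : Python repr of an int list, e.g. "[1, 2]"
def pyIntListRepr (xs : List Int) : String :=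
  "[" ++ String.intercalate ", " (xs.map PySem.Int.toStr) ++ "]"

-- inner loop over b_next; `some r` = early return, `none` = loop finished
def vuInnerA (m b_t : Int) (bs : List Int) : Option (Bool × String) :=
  match bs with
  | [] => none
  | b_next :: rest =>
    let matchList := (PySem.List.pyRange 1 (m + 1) 1).foldl
      (fun acc e => if PySem.Int.mod (b_t + e - 1) m + 1 == b_next then acc ++ [e] else acc) []
    if (matchList.length : Int) ≠ 1 then
      some (false, "(" ++ PySem.Int.toStr b_t ++ "," ++ PySem.Int.toStr b_next ++ ") has "
        ++ PySem.Int.toStr (matchList.length : Int) ++ " solutions: " ++ pyIntListRepr matchList)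
    else vuInnerA m b_t rest

-- outer loop over b_t
def vuOuterA (m : Int) (bts : List Int) : Option (Bool × String) :=
  match bts with
  | [] => none
  | b_t :: rest =>
    match vuInnerA m b_t (PySem.List.pyRange 1 (m + 1) 1) with
    | some r => some r
    | none => vuOuterA m rest

def verify_uniqueness (m : Int) : Bool × String :=
  match vuOuterA m (PySem.List.pyRange 1 (m + 1) 1) with
  | some r => r
  | none => (true, "unique e for all " ++ PySem.Int.toStr (m * m) ++ " pairs")

-- ===== PORT B =====
-- histogram pass: counts[(e % m) + 1] += 1 for e in 1..m
def vuTallyB (m : Int) (es : List Int) : PySem.Dict Int Int :=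
  es.foldl (fun d e =>
    d.insert (PySem.Int.mod e m + 1) (d.getD (PySem.Int.mod e m + 1) 0 + 1)) PySem.Dict.empty

-- check pass: every b_next in 1..m must have count 1
def vuCheckB (counts : PySem.Dict Int Int) (bs : List Int) : Option (Bool × String) :=
  match bs with
  | [] => none
  | b_next :: rest =>
    let c := counts.getD b_next 0
    if c ≠ 1 then
      some (false, "(1," ++ PySem.Int.toStr b_next ++ ") has " ++ PySem.Int.toStr c ++ " solutions")
    else vuCheckB counts rest

def verify_uniqueness_alt (m : Int) : Bool × String :=
  match vuCheckB (vuTallyB m (PySem.List.pyRange 1 (m + 1) 1)) (PySem.List.pyRange 1 (m + 1) 1) with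
  | some r => r
  | none => (true, "unique e for all " ++ PySem.Int.toStr (m * m) ++ " pairs")

-- ===== PRECONDITION & SPEC =====
def Spec_verify_uniqueness (m : Int) (out : Bool × String) : Prop := out = verify_uniqueness_alt m
instance (m : Int) (out : Bool × String) : Decidable (Spec_verify_uniqueness m out) := by unfold Spec_verify_uniqueness; infer_instance

-- ===== CLAIM (what is proved, stated in full; the proofs are below) =====
def Claim_equal_verify_uniqueness : Prop := ∀ (m : Int), Dom_verify_uniqueness m → Spec_verify_uniqueness m (verify_uniqueness m)

-- ===== LEMMAS AND PROOFS =====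

-- for 0 < m and b_next ∈ [1,m], e₀ := (b_next - b_t - 1) % m + 1 is in [1,m]
theorem vu_e0_bounds (m b_t b_next : Int) (hm : 0 < m) (_h1 : 1 ≤ b_next) (_h2 : b_next ≤ m) :
    1 ≤ PySem.Int.mod (b_next - b_t - 1) m + 1 ∧ PySem.Int.mod (b_next - b_t - 1) m + 1 ≤ m := by
  rw [PySem.Int.mod_eq_emod_of_pos hm]
  have := Int.emod_nonneg (b_next - b_t - 1) (by omega : m ≠ 0)
  have := Int.emod_lt_of_pos (b_next - b_t - 1) hm
  omega

theorem vu_e0_check (m b_t b_next : Int) (hm : 0 < m) (h1 : 1 ≤ b_next) (h2 : b_next ≤ m) :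
    PySem.Int.mod (b_t + (PySem.Int.mod (b_next - b_t - 1) m + 1) - 1) m + 1 = b_next := by
  rw [PySem.Int.mod_eq_emod_of_pos hm, PySem.Int.mod_eq_emod_of_pos hm]
  have key : (b_t + (b_next - b_t - 1) % m) % m = b_next - 1 := by
    conv_lhs => rw [Int.add_emod, Int.emod_emod_of_dvd _ (dvd_refl m), ← Int.add_emod]
    have : b_t + (b_next - b_t - 1) = b_next - 1 := by ring
    rw [this, Int.emod_eq_of_lt (by omega) (by omega)]
  have harg : b_t + ((b_next - b_t - 1) % m + 1) - 1 = b_t + (b_next - b_t - 1) % m := by ring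
  rw [harg, key]
  omega

-- the predicate of A's inner scan holds for e ∈ [1,m] exactly at e = e₀
theorem vu_pred_iff (m b_t b_next e : Int) (hm : 0 < m) (h1 : 1 ≤ b_next) (h2 : b_next ≤ m)
    (he1 : 1 ≤ e) (he2 : e ≤ m) :
    (PySem.Int.mod (b_t + e - 1) m + 1 = b_next ↔ e = PySem.Int.mod (b_next - b_t - 1) m + 1) := by
  rw [PySem.Int.mod_eq_emod_of_pos hm, PySem.Int.mod_eq_emod_of_pos hm]
  constructor
  · intro h
    have h' : (b_t + e - 1) % m = b_next - 1 := by omega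
    have e1 : (e - 1) % m = e - 1 := Int.emod_eq_of_lt (by omega) (by omega)
    have : (b_next - b_t - 1) % m = (b_t + e - 1 - b_t) % m := by
      conv_lhs => rw [show b_next - b_t - 1 = (b_next - 1) - b_t by ring, ← h']
      rw [Int.sub_emod, Int.emod_emod_of_dvd _ (dvd_refl m), ← Int.sub_emod]
    rw [this, show b_t + e - 1 - b_t = e - 1 by ring, e1]
    omega
  · intro h
    have := vu_e0_check m b_t b_next hm h1 h2
    rw [PySem.Int.mod_eq_emod_of_pos hm, PySem.Int.mod_eq_emod_of_pos hm] at this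
    rw [h]; exact this

-- A's matchList list is exactly [e₀]
theorem vu_matchList_eq (m b_t b_next : Int) (hm : 0 < m) (h1 : 1 ≤ b_next) (h2 : b_next ≤ m) :
    (PySem.List.pyRange 1 (m + 1) 1).foldl
      (fun acc e => if PySem.Int.mod (b_t + e - 1) m + 1 == b_next then acc ++ [e] else acc) []
    = [PySem.Int.mod (b_next - b_t - 1) m + 1] := by
  set e0 := PySem.Int.mod (b_next - b_t - 1) m + 1 with he0
  rw [PySem.List.foldl_append_if_eq_filter]
  have hmem : ∀ e ∈ PySem.List.pyRange 1 (m + 1) 1,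
      ((PySem.Int.mod (b_t + e - 1) m + 1 == b_next) = (e == e0)) := by
    intro e he
    rw [PySem.List.mem_pyRange_one] at he
    have := vu_pred_iff m b_t b_next e hm h1 h2 (by omega) (by omega)
    by_cases h : e = e0
    · subst h
      simp [this.mpr rfl]
    · have hne : PySem.Int.mod (b_t + e - 1) m + 1 ≠ b_next := fun hc => h (this.mp hc)
      simp [h, hne]
  rw [List.filter_congr hmem, List.filter_beq]
  have he0m : e0 ∈ PySem.List.pyRange 1 (m + 1) 1 := by
    rw [PySem.List.mem_pyRange_one]
    have := vu_e0_bounds m b_t b_next hm h1 h2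
    omega
  rw [List.count_eq_one_of_mem (PySem.List.nodup_pyRange_one 1 (m + 1)) he0m]
  rfl

theorem vuInnerA_none (m b_t : Int) (hm : 0 < m) (bs : List Int)
    (hbs : ∀ b ∈ bs, 1 ≤ b ∧ b ≤ m) : vuInnerA m b_t bs = none := by
  induction bs with
  | nil => rfl
  | cons b rest ih =>
    have hb := hbs b (List.mem_cons_self ..)
    rw [vuInnerA, vu_matchList_eq m b_t b hm hb.1 hb.2]
    norm_num
    exact ih (fun x hx => hbs x (List.mem_cons_of_mem _ hx))

theorem vuOuterA_none (m : Int) (hm : 0 < m) (bts : List Int) : vuOuterA m bts = none := by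
  induction bts with
  | nil => rfl
  | cons b rest ih =>
    rw [vuOuterA, vuInnerA_none m b hm _ (fun x hx => by
      rw [PySem.List.mem_pyRange_one] at hx; omega)]
    exact ih

-- B's histogram has count 1 at every b ∈ [1,m]
theorem vu_tally_getD (m b : Int) (hm : 0 < m) (h1 : 1 ≤ b) (h2 : b ≤ m) :
    (vuTallyB m (PySem.List.pyRange 1 (m + 1) 1)).getD b 0 = 1 := by
  unfold vuTallyB
  have hfold : List.foldl (fun (d : PySem.Dict Int Int) (e : Int) =>
        d.insert (PySem.Int.mod e m + 1) (d.getD (PySem.Int.mod e m + 1) 0 + 1))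
      PySem.Dict.empty (PySem.List.pyRange 1 (m + 1) 1)
    = List.foldl (fun (d : PySem.Dict Int Int) x => d.insert x (d.getD x 0 + 1))
      PySem.Dict.empty ((PySem.List.pyRange 1 (m + 1) 1).map (fun e => PySem.Int.mod e m + 1)) :=
    (List.foldl_map (f := fun e => PySem.Int.mod e m + 1)
      (g := fun (d : PySem.Dict Int Int) x => d.insert x (d.getD x 0 + 1))
      (l := PySem.List.pyRange 1 (m + 1) 1) (init := PySem.Dict.empty)).symm
  rw [hfold, PySem.Dict.getD_foldl_insert_add_one, PySem.Dict.getD_empty]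
  have hcnt : ((PySem.List.pyRange 1 (m + 1) 1).map (fun e => PySem.Int.mod e m + 1)).count b
      = ((PySem.List.pyRange 1 (m + 1) 1).filter (fun e => PySem.Int.mod e m + 1 == b)).length := by
    rw [List.count_eq_length_filter, List.filter_map, List.length_map]
    rfl
  rw [hcnt]
  set e0 := PySem.Int.mod (b - 1 - 1) m + 1 with he0
  have hmem : ∀ e ∈ PySem.List.pyRange 1 (m + 1) 1,
      ((PySem.Int.mod e m + 1 == b) = (e == e0)) := by
    intro e he
    rw [PySem.List.mem_pyRange_one] at he
    have hiff := vu_pred_iff m 1 b e hm h1 h2 (by omega) (by omega)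
    rw [show (1 : Int) + e - 1 = e by ring] at hiff
    by_cases h : e = e0
    · subst h
      simp [hiff.mpr rfl]
    · have hne : PySem.Int.mod e m + 1 ≠ b := fun hc => h (hiff.mp hc)
      simp [h, hne]
  rw [List.filter_congr hmem, List.filter_beq]
  have he0m : e0 ∈ PySem.List.pyRange 1 (m + 1) 1 := by
    rw [PySem.List.mem_pyRange_one]
    have := vu_e0_bounds m 1 b hm h1 h2
    omega
  rw [List.count_eq_one_of_mem (PySem.List.nodup_pyRange_one 1 (m + 1)) he0m]
  simp

theorem vuCheckB_none (m : Int) (hm : 0 < m) (bs : List Int)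
    (hbs : ∀ b ∈ bs, 1 ≤ b ∧ b ≤ m) :
    vuCheckB (vuTallyB m (PySem.List.pyRange 1 (m + 1) 1)) bs = none := by
  induction bs with
  | nil => rfl
  | cons b rest ih =>
    have hb := hbs b (List.mem_cons_self ..)
    rw [vuCheckB]
    simp only [vu_tally_getD m b hm hb.1 hb.2]
    norm_num
    exact ih (fun x hx => hbs x (List.mem_cons_of_mem _ hx))

-- ===== VERDICT (by name: the statement is the Claim_ definition above) =====
theorem verify_uniqueness_spec : Claim_equal_verify_uniqueness := by
  intro m _
  unfold Spec_verify_uniqueness verify_uniqueness verify_uniqueness_alt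
  by_cases hm : 0 < m
  · rw [vuOuterA_none m hm, vuCheckB_none m hm _ (fun x hx => by
      rw [PySem.List.mem_pyRange_one] at hx; omega)]
  · rw [PySem.List.pyRange_one_eq_nil (by omega)]
    rfl
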